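-- pv_equiv track=rewrite | github.com/heroworkshop/advent_of_code | y2024/day_12.py | count_distinct_sides
-- ===== SOURCE A (Python) =====
-- def count_distinct_sides(p_list: list[int]) -> int:
--     p_list = sorted(p_list)
--     s_last = p_list[0]
--     count = 1
--     for s in p_list[1:]:
--         if abs(s - s_last) > 1:
--             count += 1
--         s_last = s
--     return count
-- ===== SOURCE B (Python) =====
-- def count_distinct_sides(p_list: list[int]) -> int:
--     s = set(p_list)
--     return sum(1 for x in s if x - 1 not in s)
-- ===== Notes on version B (the rewrite author's own statement) =====
-- stated objective: alternative
-- what changed: Replaces A's sort-then-scan over adjacent gaps with a hash-set membership count of run-starts (x in s with x-1 not in s), removing the sort entirely.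
import Mathlib
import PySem

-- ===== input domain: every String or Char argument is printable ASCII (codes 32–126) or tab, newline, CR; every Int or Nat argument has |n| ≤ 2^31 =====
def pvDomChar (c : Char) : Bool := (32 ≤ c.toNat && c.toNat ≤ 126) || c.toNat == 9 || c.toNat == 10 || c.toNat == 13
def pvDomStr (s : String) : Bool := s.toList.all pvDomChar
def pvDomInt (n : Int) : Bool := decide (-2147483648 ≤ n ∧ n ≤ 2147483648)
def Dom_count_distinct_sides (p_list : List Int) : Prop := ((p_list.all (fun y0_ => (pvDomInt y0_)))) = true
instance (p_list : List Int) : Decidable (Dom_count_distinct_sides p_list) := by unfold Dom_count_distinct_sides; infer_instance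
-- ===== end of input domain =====

-- B replaces A's sort-then-scan of adjacent gaps by a set-membership count of run-starts
-- (x in the set with x-1 not in the set); equivalence is proved for nonempty lists (A raises IndexError on []).

-- ===== PORT A =====
def count_distinct_sides (p_list : List Int) : Int :=
  let sl := PySem.List.sorted p_list (fun x => x) false
  match PySem.List.pyGet? sl 0 with
  | none => 0   -- Python raises IndexError here (empty list); excluded by Pre_
  | some s0 =>
    ((PySem.List.slice sl (some 1) none).foldl
      (fun (st : Int × Int) s => (s, if 1 < |s - st.1| then st.2 + 1 else st.2))
      (s0, 1)).2

-- ===== PORT B =====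
def count_distinct_sides_alt (p_list : List Int) : Int :=
  let s : PySem.Set Int := PySem.Set.ofList p_list
  s.foldl (fun acc x => if ¬ PySem.Set.contains s (x - 1) then acc + 1 else acc) 0

-- ===== PRECONDITION & SPEC =====
-- Pre_ excludes exactly the empty list, on which A raises IndexError (it reads p_list[0]).
def Pre_count_distinct_sides (p_list : List Int) : Prop := p_list ≠ []
instance (p_list : List Int) : Decidable (Pre_count_distinct_sides p_list) := by unfold Pre_count_distinct_sides; infer_instance
def pvWitness_count_distinct_sides : List Int := [1, 2, 5]

def Spec_count_distinct_sides (p_list : List Int) (out : Int) : Prop := out = count_distinct_sides_alt p_list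
instance (p_list : List Int) (out : Int) : Decidable (Spec_count_distinct_sides p_list out) := by unfold Spec_count_distinct_sides; infer_instance

-- ===== CLAIM (what is proved, stated in full; the proofs are below) =====
def Claim_equal_count_distinct_sides : Prop := ∀ (p_list : List Int), Dom_count_distinct_sides p_list → Pre_count_distinct_sides p_list → Spec_count_distinct_sides p_list (count_distinct_sides p_list)

-- ===== LEMMAS AND PROOFS =====

-- number of adjacent gaps > 1 that A's scan counts
def pvGap : Int → List Int → Int
  | _, [] => 0
  | prev, s :: r => (if 1 < |s - prev| then 1 else 0) + pvGap s r

-- number of run-starts among the distinct elements of l (order-free characterisation)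
def pvStarts (l : List Int) : Nat :=
  (l.toFinset.filter (fun x => x - 1 ∉ l.toFinset)).card

lemma pvFoldA (t : List Int) (prev c : Int) :
    ((t.foldl (fun (st : Int × Int) s => (s, if 1 < |s - st.1| then st.2 + 1 else st.2)) (prev, c)).2)
      = c + pvGap prev t := by
  induction t generalizing prev c with
  | nil => simp [pvGap]
  | cons s r ih =>
      simp only [List.foldl_cons, pvGap]
      rw [ih]
      split_ifs <;> ring

lemma pvMain (t : List Int) (prev : Int) (h : (prev :: t).Pairwise (· ≤ ·)) :
    1 + pvGap prev t = (pvStarts (prev :: t) : Int) := by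
  induction t generalizing prev with
  | nil =>
      simp [pvGap, pvStarts, Finset.filter_singleton]
  | cons s r ih =>
      have hle : prev ≤ s := (List.pairwise_cons.mp h).1 s (by simp)
      have hs : (s :: r).Pairwise (· ≤ ·) := (List.pairwise_cons.mp h).2
      have hsall : ∀ y ∈ (s :: r).toFinset, s ≤ y := by
        intro y hy
        rw [List.mem_toFinset] at hy
        rcases List.mem_cons.mp hy with hy | hy
        · exact le_of_eq hy.symm
        · exact (List.pairwise_cons.mp hs).1 y hy
      have ihs := ih s hs
      by_cases hps : prev = s
      · subst hps
        have hgap0 : ¬ (1 : Int) < |prev - prev| := by simp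
        have hfs : (prev :: prev :: r).toFinset = (prev :: r).toFinset := by
          simp [List.toFinset_cons]
        have : pvStarts (prev :: prev :: r) = pvStarts (prev :: r) := by
          unfold pvStarts; rw [hfs]
        rw [this]
        simp only [pvGap, if_neg hgap0]
        rw [← ihs]; ring
      · have hlt : prev < s := lt_of_le_of_ne hle hps
        have hnm : prev ∉ ((s :: r).toFinset) := by
          intro hmem
          exact absurd (hsall prev hmem) (not_le.mpr hlt)
        have hT : (prev :: s :: r).toFinset = insert prev ((s :: r).toFinset) := by
          simp [List.toFinset_cons]
        have hPprev : (prev : Int) - 1 ∉ (prev :: s :: r).toFinset := by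
          rw [hT, Finset.mem_insert]
          push Not
          refine ⟨by omega, fun hmem => ?_⟩
          have := hsall _ hmem; omega
        -- card of the filtered big set = 1 + card of filter over F' with the big predicate
        have hfi : ((prev :: s :: r).toFinset.filter (fun x => x - 1 ∉ (prev :: s :: r).toFinset))
            = insert prev (((s :: r).toFinset).filter (fun x => x - 1 ∉ (prev :: s :: r).toFinset)) := by
          rw [hT, Finset.filter_insert, if_pos (by rw [← hT]; exact hPprev)]
        have hcard1 : pvStarts (prev :: s :: r)
            = 1 + (((s :: r).toFinset).filter (fun x => x - 1 ∉ (prev :: s :: r).toFinset)).card := by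
          unfold pvStarts
          rw [hfi, Finset.card_insert_of_notMem (by
            intro hmem
            exact hnm (Finset.mem_filter.mp hmem).1)]
          omega
        by_cases hgap : (1 : Int) < s - prev
        · -- gap: prev+1 is in nobody's way; the two filters coincide
          have hfe : (((s :: r).toFinset).filter (fun x => x - 1 ∉ (prev :: s :: r).toFinset))
              = ((s :: r).toFinset).filter (fun x => x - 1 ∉ (s :: r).toFinset) := by
            apply Finset.filter_congr
            intro x hx
            have hsx := hsall x hx
            rw [hT]
            simp only [Finset.mem_insert, not_or]
            constructor
            · exact fun ⟨_, h2⟩ => h2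
            · exact fun h2 => ⟨by omega, h2⟩
          have habs : (1 : Int) < |s - prev| := by rw [abs_of_pos (by omega)]; exact hgap
          rw [hcard1, hfe]
          simp only [pvGap, if_pos habs]
          have := ihs
          unfold pvStarts at this
          push_cast
          omega
        · -- no gap: s = prev + 1, the run-start s disappears
          have hseq : s = prev + 1 := by omega
          have hsmem : s ∈ ((s :: r).toFinset).filter (fun x => x - 1 ∉ (s :: r).toFinset) := by
            rw [Finset.mem_filter]
            refine ⟨by simp, fun hmem => ?_⟩
            have := hsall _ hmem; omega
          have hfe : (((s :: r).toFinset).filter (fun x => x - 1 ∉ (prev :: s :: r).toFinset))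
              = (((s :: r).toFinset).filter (fun x => x - 1 ∉ (s :: r).toFinset)).erase s := by
            ext x
            rw [Finset.mem_erase, Finset.mem_filter, Finset.mem_filter, hT]
            simp only [Finset.mem_insert, not_or]
            constructor
            · rintro ⟨hx, h1, h2⟩
              exact ⟨by omega, hx, h2⟩
            · rintro ⟨hne, hx, h2⟩
              exact ⟨hx, by omega, h2⟩
          rw [hcard1, hfe, Finset.card_erase_of_mem hsmem]
          have habs : ¬ (1 : Int) < |s - prev| := by rw [abs_of_pos (by omega)]; omega
          simp only [pvGap, if_neg habs]
          have := ihs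
          unfold pvStarts at this
          have hge : 1 ≤ (((s :: r).toFinset).filter (fun x => x - 1 ∉ (s :: r).toFinset)).card :=
            Finset.card_pos.mpr ⟨s, hsmem⟩
          push_cast [Nat.cast_sub hge]
          omega

lemma pvCountP (u : List Int) (h : u.Nodup) (p : Int → Bool) :
    u.countP p = (u.toFinset.filter (fun x => p x = true)).card := by
  induction u with
  | nil => simp
  | cons x u ih =>
      have hx : x ∉ u := (List.nodup_cons.mp h).1
      have hu := (List.nodup_cons.mp h).2
      rw [List.countP_cons, List.toFinset_cons, Finset.filter_insert, ih hu]
      by_cases hp : p x = true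
      · rw [if_pos hp, if_pos hp, Finset.card_insert_of_notMem (by
          intro hmem
          exact hx (List.mem_toFinset.mp (Finset.mem_filter.mp hmem).1))]
      · rw [if_neg hp, if_neg (by simp [hp])]
        omega

-- ===== VERDICT (by name: the statement is the Claim_ definition above) =====
theorem count_distinct_sides_spec : Claim_equal_count_distinct_sides := by
  intro p_list _ hpre
  unfold Spec_count_distinct_sides
  obtain ⟨s0, t, hcons⟩ := List.exists_cons_of_ne_nil
    ((not_iff_not.mpr (PySem.List.sorted_eq_nil_iff p_list (fun x => x) false)).mpr hpre)
  -- A computes 1 + pvGap s0 t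
  have hA : count_distinct_sides p_list = 1 + pvGap s0 t := by
    unfold count_distinct_sides
    simp only [hcons, PySem.List.pyGet?_zero_cons, PySem.List.slice_from_one, List.tail_cons]
    exact pvFoldA t s0 1
  have hpair : (s0 :: t).Pairwise (· ≤ ·) := by
    have := PySem.List.sorted_pairwise p_list (fun x => x)
    rw [hcons] at this
    simpa using this
  have hpm : (s0 :: t).Perm p_list := by
    rw [← hcons]; exact PySem.List.sorted_perm p_list (fun x => x) false
  have hperm : (s0 :: t).toFinset = p_list.toFinset := by
    ext x
    simp only [List.mem_toFinset]
    exact hpm.mem_iff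
  -- B computes pvStarts p_list
  have hB : count_distinct_sides_alt p_list = (pvStarts p_list : Int) := by
    unfold count_distinct_sides_alt
    simp only
    rw [PySem.List.foldl_ite_add_one]
    have hnodup := PySem.Set.nodup_ofList p_list
    rw [pvCountP _ hnodup]
    have hto : (PySem.Set.ofList p_list).toFinset = p_list.toFinset := by
      ext x
      simp [List.mem_toFinset, PySem.Set.mem_ofList]
    have hfe : ((PySem.Set.ofList p_list).toFinset.filter
          (fun x => (decide ¬ PySem.Set.contains (PySem.Set.ofList p_list) (x - 1) = true) = true))
        = p_list.toFinset.filter (fun x => x - 1 ∉ p_list.toFinset) := by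
      rw [hto]
      apply Finset.filter_congr
      intro x _
      simp [PySem.Set.contains, PySem.Set.mem_ofList, List.mem_toFinset]
    rw [hfe]
    simp [pvStarts]
  rw [hA, hB, ← show pvStarts (s0 :: t) = pvStarts p_list by unfold pvStarts; rw [hperm]]
  exact pvMain t s0 hpair
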